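-- pv_equiv track=rewrite | github.com/pitt-rover-project/URC | guis/subscribers/GPSDataParser.py | parse_gagsv
-- ===== SOURCE A (Python) =====
-- def parse_gagsv(nmea_sentence: str) -> list[int] | str | None:
--     """
--     Extracts SNR values from a GAGSV or GBGSV sentence.
--
--     Args:
--         nmea_sentence (str): NMEA sentence.
--
--     Returns:
--         list[int]: Extracted SNR values.
--         str: "NO CONNECTION!!!" if empty.
--         None: If invalid sentence.
--     """
--     if nmea_sentence == "":
--         return "NO CONNECTION!!!"
--
--     fields = nmea_sentence.split(',')
--
--     # Check if it's a valid GAGSV or GBGSV message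
--     if not fields[0].startswith("GAGSV") and not fields[0].startswith("GBGSV"):
--         return None  # Not a GAGSV or GBGSV sentence
--
--     snr_values = []
--
--     # Satellite data starts at index 4 and repeats every 4 elements
--     for i in range(4, len(fields) - 1, 4):
--         if i + 3 < len(fields):  # Ensure SNR field exists
--             snr = fields[i + 3]  # SNR is the 4th value in the set
--             if snr.isdigit():  # Some SNR values might be missing (empty)
--                 snr_values.append(int(snr))
--     return snr_values
-- ===== SOURCE B (Python) =====
-- def parse_gagsv(nmea_sentence: str):
--     if nmea_sentence == "":
--         return "NO CONNECTION!!!"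
--     fields = nmea_sentence.split(',')
--     if not (fields[0].startswith("GAGSV") or fields[0].startswith("GBGSV")):
--         return None
--     # Consume the satellite blocks as a list: drop the 7-field header up to the
--     # first SNR, then repeatedly take the head (an SNR field) and drop a whole
--     # 4-field block.  No index arithmetic, no bounds guard.
--     snr_values = []
--     rest = fields[7:]
--     while rest:
--         head = rest[0]
--         if head.isdigit():
--             snr_values.append(int(head))
--         rest = rest[4:]
--     return snr_values
-- ===== Notes on version B (the rewrite author's own statement) =====
-- stated objective: alternative
-- what changed: A iterates indices range(4, len-1, 4) with an i+3<len bounds guard and reads fields[i+3]; B never indexes: it drops the 7-field header and then consumes the field list itself, popping the head SNR and dropping a 4-field block per step until the list is empty.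
-- outside the precondition, e.g. on parse_gagsv(''): A returns 'NO CONNECTION!!!', B returns 'NO CONNECTION!!!'
import Mathlib
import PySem

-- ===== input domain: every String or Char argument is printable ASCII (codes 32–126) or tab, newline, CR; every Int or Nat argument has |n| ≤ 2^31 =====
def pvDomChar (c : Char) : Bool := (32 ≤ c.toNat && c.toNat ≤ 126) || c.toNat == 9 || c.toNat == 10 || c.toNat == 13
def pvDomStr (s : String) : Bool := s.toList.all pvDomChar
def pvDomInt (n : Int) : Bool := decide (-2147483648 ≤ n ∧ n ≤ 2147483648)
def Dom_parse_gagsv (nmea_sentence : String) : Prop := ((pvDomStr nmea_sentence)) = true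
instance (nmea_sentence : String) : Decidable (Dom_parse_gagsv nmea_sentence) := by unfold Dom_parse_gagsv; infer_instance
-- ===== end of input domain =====

-- B replaces A's stride-4 index loop (with an i+3<len bounds guard) by a loop that consumes
-- the field list itself: drop the 7-field header, then pop the head SNR and drop a 4-field
-- block per step (objective: alternative; not claimed faster).

-- ===== PORT A =====
def parse_gagsv (nmea_sentence : String) : Option (List Int) :=
  if nmea_sentence = "" then
    none  -- Python returns the string "NO CONNECTION!!!" here (not a list); excluded by Pre_
  else
    let fields := (PySem.Str.split? nmea_sentence ",").getD []  -- separator "," ≠ "", split never raises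
    if !(PySem.Str.startswith (PySem.List.pyGetD fields 0 "") "GAGSV")
       && !(PySem.Str.startswith (PySem.List.pyGetD fields 0 "") "GBGSV") then
      none
    else
      some ((PySem.List.pyRange 4 (PySem.List.len fields - 1) 4).foldl
        (fun acc i =>
          if i + 3 < PySem.List.len fields then
            -- the guard i+3 < len ensures the index is in range, so fields[i+3] never raises
            let snr := PySem.List.pyGetD fields (i + 3) ""
            if PySem.Str.strIsdigit snr then
              acc ++ [(PySem.Int.ofStr? snr).getD 0]  -- isdigit guard: int(snr) never raises
            else acc
          else acc) [])

-- ===== PORT B =====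
-- termination helper for the while loop: rest[4:] is shorter than a nonempty rest
theorem pv_slice4 (l : List String) : PySem.List.slice l (some 4) none = l.drop 4 := by
  have h : ((4 : Nat) : Int) = (4 : Int) := by norm_num
  rw [← h, PySem.List.slice_from_natCast]

-- the while loop of Source B: consume rest, pop rest[0], continue with rest[4:]
def pvSnrsLoop (rest : List String) (acc : List Int) : List Int :=
  if h : rest = [] then acc
  else
    let head := PySem.List.pyGetD rest 0 ""   -- rest[0]; rest nonempty so in range
    pvSnrsLoop (PySem.List.slice rest (some 4) none)
      (if PySem.Str.strIsdigit head then acc ++ [(PySem.Int.ofStr? head).getD 0] else acc)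
termination_by rest.length
decreasing_by
  rw [pv_slice4]
  simp only [List.length_drop]
  have := List.length_pos_iff.mpr h
  omega

def parse_gagsv_alt (nmea_sentence : String) : Option (List Int) :=
  if nmea_sentence = "" then
    none  -- Python returns the string "NO CONNECTION!!!" here (not a list); excluded by Pre_
  else
    let fields := (PySem.Str.split? nmea_sentence ",").getD []  -- separator "," ≠ "", split never raises
    if PySem.Str.startswith (PySem.List.pyGetD fields 0 "") "GAGSV"
       || PySem.Str.startswith (PySem.List.pyGetD fields 0 "") "GBGSV" then
      some (pvSnrsLoop (PySem.List.slice fields (some 7) none) [])   -- rest = fields[7:]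
    else none

-- ===== PRECONDITION & SPEC =====
-- Pre_ excludes only the empty string, on which A returns the str "NO CONNECTION!!!",
-- a value outside the declared Option (List Int) result type.
def Pre_parse_gagsv (nmea_sentence : String) : Prop := nmea_sentence ≠ ""
instance (nmea_sentence : String) : Decidable (Pre_parse_gagsv nmea_sentence) := by
  unfold Pre_parse_gagsv; infer_instance

def pvWitness_parse_gagsv : String := "GAGSV,3,1,09,02,45,120,38,05,30,210,41"

def Spec_parse_gagsv (nmea_sentence : String) (out : Option (List Int)) : Prop :=
  out = parse_gagsv_alt nmea_sentence
instance (nmea_sentence : String) (out : Option (List Int)) : Decidable (Spec_parse_gagsv nmea_sentence out) := by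
  unfold Spec_parse_gagsv; infer_instance

-- ===== CLAIM (what is proved, stated in full; the proofs are below) =====
def Claim_equal_parse_gagsv : Prop := ∀ (nmea_sentence : String), Dom_parse_gagsv nmea_sentence → Pre_parse_gagsv nmea_sentence → Spec_parse_gagsv nmea_sentence (parse_gagsv nmea_sentence)

-- ===== LEMMAS AND PROOFS =====

theorem pv_slice7 (l : List String) : PySem.List.slice l (some 7) none = l.drop 7 := by
  have h : ((7 : Nat) : Int) = (7 : Int) := by norm_num
  rw [← h, PySem.List.slice_from_natCast]

-- contribution of the SNR field at index m + 4*k: the common middle form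
def pvGm (fields : List String) (m k : Nat) : List Int :=
  if m + 4 * k < fields.length then
    if PySem.Str.strIsdigit (fields[m + 4 * k]?.getD "") then
      [(PySem.Int.ofStr? (fields[m + 4 * k]?.getD "")).getD 0]
    else []
  else []

def pvG (fields : List String) (k : Nat) : List Int := pvGm fields 7 k

theorem pv_flatMap_range_shrink {β : Type} (g : Nat → List β) (B : Nat) :
    ∀ (K : Nat), B ≤ K → (∀ k, B ≤ k → g k = []) →
    (List.range K).flatMap g = (List.range B).flatMap g := by
  intro K
  induction K with
  | zero =>
    intro hBK _
    have hB0 : B = 0 := by omega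
    subst hB0
    rfl
  | succ K ih =>
    intro hBK hz
    by_cases h : B ≤ K
    · rw [List.range_succ, List.flatMap_append, ih h hz]
      simp [hz K h]
    · have hBK1 : B = K + 1 := by omega
      rw [hBK1]

-- A's loop equals the common middle form, flatMapped over all of range fields.length
theorem pv_A_loop (fields : List String) :
    (PySem.List.pyRange 4 (PySem.List.len fields - 1) 4).foldl
      (fun acc i =>
        if i + 3 < PySem.List.len fields then
          let snr := PySem.List.pyGetD fields (i + 3) ""
          if PySem.Str.strIsdigit snr then acc ++ [(PySem.Int.ofStr? snr).getD 0] else acc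
        else acc) []
    = (List.range fields.length).flatMap (pvG fields) := by
  have hbody :
      (fun (acc : List Int) (i : Int) =>
        if i + 3 < PySem.List.len fields then
          let snr := PySem.List.pyGetD fields (i + 3) ""
          if PySem.Str.strIsdigit snr then acc ++ [(PySem.Int.ofStr? snr).getD 0] else acc
        else acc)
      = (fun acc i => acc ++
          (if i + 3 < PySem.List.len fields then
            (if PySem.Str.strIsdigit (PySem.List.pyGetD fields (i + 3) "") then
              [(PySem.Int.ofStr? (PySem.List.pyGetD fields (i + 3) "")).getD 0]
            else [])
          else [])) := by
    funext acc i; split_ifs <;> simp_all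
  rw [hbody, PySem.List.foldl_append_eq_flatMap,
    PySem.List.pyRange_of_pos 4 (PySem.List.len fields - 1) (by norm_num),
    List.flatMap_map]
  simp only [PySem.List.len_eq, List.nil_append]
  have hfun : ∀ k : Nat,
      (if (4:Int) + 4 * (k:Int) + 3 < (fields.length : Int) then
        (if PySem.Str.strIsdigit (PySem.List.pyGetD fields ((4:Int) + 4 * (k:Int) + 3) "") then
          [(PySem.Int.ofStr? (PySem.List.pyGetD fields ((4:Int) + 4 * (k:Int) + 3) "")).getD 0]
        else [])
      else []) = pvG fields k := by
    intro k
    have hidx : (4:Int) + 4 * (k:Int) + 3 = ((7 + 4 * k : Nat) : Int) := by push_cast; ring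
    rw [hidx, PySem.List.pyGetD_natCast]
    unfold pvG pvGm
    simp only [List.getD_eq_getElem?_getD]
    by_cases h : 7 + 4 * k < fields.length
    · rw [if_pos (by exact_mod_cast h), if_pos h]
    · rw [if_neg (by exact_mod_cast h), if_neg h]
  refine Eq.trans (List.flatMap_congr (fun k _ => hfun k)) ?_
  by_cases h5 : (4:Int) < (fields.length : Int) - 1
  · rw [if_pos h5]
    exact (pv_flatMap_range_shrink (pvG fields)
      (((fields.length : Int) - 1 - 4 + 4 - 1) / 4).toNat fields.length (by omega)
      (fun k hk => by unfold pvG pvGm; rw [if_neg (by omega)])).symm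
  · rw [if_neg h5]
    exact (pv_flatMap_range_shrink (pvG fields) 0 fields.length (by omega)
      (fun k _ => by unfold pvG pvGm; rw [if_neg (by omega)])).symm

-- shifting the block index by one block
theorem pvGm_succ (fields : List String) (m k : Nat) :
    pvGm fields m (k + 1) = pvGm fields (m + 4) k := by
  unfold pvGm
  have h : m + 4 * (k + 1) = m + 4 + 4 * k := by ring
  rw [h]

-- B's while loop over fields.drop m equals the middle form for indices m, m+4, …
theorem pv_snrs_flatMap :
    ∀ (N m : Nat) (fields : List String) (acc : List Int),
      fields.length ≤ m + 4 * N →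
      pvSnrsLoop (fields.drop m) acc = acc ++ (List.range N).flatMap (pvGm fields m) := by
  intro N
  induction N with
  | zero =>
    intro m fields acc h
    have hnil : fields.drop m = [] := List.drop_eq_nil_of_le (by omega)
    rw [pvSnrsLoop, dif_pos hnil]
    simp
  | succ N ih =>
    intro m fields acc h
    by_cases hm : m < fields.length
    · have hdrop : fields.drop m = fields[m] :: fields.drop (m + 1) :=
        List.drop_eq_getElem_cons hm
      rw [pvSnrsLoop, dif_neg (by rw [hdrop]; exact List.cons_ne_nil _ _)]
      have hhead : PySem.List.pyGetD (fields.drop m) 0 "" = fields[m] := by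
        rw [hdrop]; simp [pysem, List.getElem?_eq_getElem hm]
      have hrest : PySem.List.slice (fields.drop m) (some 4) none = fields.drop (m + 4) := by
        rw [pv_slice4, List.drop_drop]
      rw [hhead, hrest, ih (m + 4) fields _ (by omega)]
      rw [List.range_succ_eq_map, List.flatMap_cons, List.flatMap_map]
      have hsh : (fun k => pvGm fields m (k + 1)) = pvGm fields (m + 4) := by
        funext k; exact pvGm_succ fields m k
      have hg0 : pvGm fields m 0 =
          if PySem.Str.strIsdigit fields[m] then [(PySem.Int.ofStr? fields[m]).getD 0] else [] := by
        unfold pvGm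
        rw [if_pos (by omega)]
        simp [List.getElem?_eq_getElem hm]
      simp only [Nat.succ_eq_add_one, hsh, hg0]
      split_ifs <;> simp
    · have hnil : fields.drop m = [] := List.drop_eq_nil_of_le (by omega)
      rw [pvSnrsLoop, dif_pos hnil]
      have : (List.range (N + 1)).flatMap (pvGm fields m) = [] := by
        rw [List.flatMap_eq_nil_iff]
        intro x hx
        simp only [List.mem_range] at hx
        unfold pvGm
        rw [if_neg (by omega)]
      rw [this, List.append_nil]

-- B's loop on fields[7:] equals the common middle form over all of range fields.length
theorem pv_B_list (fields : List String) :
    pvSnrsLoop (PySem.List.slice fields (some 7) none) [] =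
      (List.range fields.length).flatMap (pvG fields) := by
  rw [pv_slice7, pv_snrs_flatMap fields.length 7 fields [] (by omega), List.nil_append]
  rfl

-- ===== VERDICT (by name: the statement is the Claim_ definition above) =====
theorem parse_gagsv_spec : Claim_equal_parse_gagsv := by
  intro s _ hpre
  unfold Spec_parse_gagsv parse_gagsv parse_gagsv_alt
  rw [if_neg hpre, if_neg hpre]
  set fields := (PySem.Str.split? s ",").getD [] with hf
  by_cases hA : PySem.Str.startswith (PySem.List.pyGetD fields 0 "") "GAGSV"
    <;> by_cases hB : PySem.Str.startswith (PySem.List.pyGetD fields 0 "") "GBGSV"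
    <;> simp only [hA, hB, Bool.not_true, Bool.not_false, Bool.false_and, Bool.and_self,
          Bool.and_false, Bool.or_self, Bool.true_or, Bool.or_true, Bool.false_eq_true,
          if_true, if_false]
    <;> rw [pv_A_loop, pv_B_list]
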